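-- pv_equiv track=rewrite | github.com/dbalatoni13/nfsmw | tools/lookup.py | _candidate_func_names
-- ===== SOURCE A (Python) =====
-- def _normalise_func_name(name: str) -> str:
--     """
--     Strip a query like  EPerfectLaunch::~EPerfectLaunch(void)
--     down to the bare qualified name without parameter list:
--         EPerfectLaunch::~EPerfectLaunch
--     This lets us match against signatures that may have different param lists
--     or return-type prefixes in the DWARF output.
--     """
--     # Drop everything from the first '(' onwards
--     paren = name.find("(")
--     if paren != -1:
--         name = name[:paren]
--     return name.strip()
--
-- def _candidate_func_names(name: str) -> list[str]:
--     """
--     Generate progressively shorter qualified-name suffixes.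
--
--     Example:
--       Attrib::Class::RemoveCollection -> [
--           'Attrib::Class::RemoveCollection',
--           'Class::RemoveCollection',
--           'RemoveCollection',
--       ]
--
--     This helps match DWARF signatures that omit leading namespaces.
--     """
--     bare = _normalise_func_name(name)
--     if not bare:
--         return []
--
--     parts = bare.split("::")
--     candidates: list[str] = []
--     for index in range(len(parts)):
--         candidate = "::".join(parts[index:]).strip()
--         if candidate and candidate not in candidates:
--             candidates.append(candidate)
--     return candidates
-- ===== SOURCE B (Python) =====
-- def _normalise_func_name(name: str) -> str:
--     paren = name.find("(")
--     if paren != -1: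
--         name = name[:paren]
--     return name.strip()
--
-- def _candidate_func_names(name: str) -> list[str]:
--     # Walk the string by '::' positions instead of building a parts list.
--     bare = _normalise_func_name(name)
--     if not bare:
--         return []
--     out: list[str] = []
--     s = bare
--     while True:
--         cand = s.strip()
--         if cand and cand not in out:
--             out.append(cand)
--         idx = s.find("::")
--         if idx == -1:
--             break
--         s = s[idx + 2:]
--     return out
-- ===== Notes on version B (the rewrite author's own statement) =====
-- stated objective: alternative
-- what changed: B scans the string by '::' positions keeping a running suffix string, instead of splitting into a parts list and re-joining parts[index:] on every iteration.
import Mathlib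
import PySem

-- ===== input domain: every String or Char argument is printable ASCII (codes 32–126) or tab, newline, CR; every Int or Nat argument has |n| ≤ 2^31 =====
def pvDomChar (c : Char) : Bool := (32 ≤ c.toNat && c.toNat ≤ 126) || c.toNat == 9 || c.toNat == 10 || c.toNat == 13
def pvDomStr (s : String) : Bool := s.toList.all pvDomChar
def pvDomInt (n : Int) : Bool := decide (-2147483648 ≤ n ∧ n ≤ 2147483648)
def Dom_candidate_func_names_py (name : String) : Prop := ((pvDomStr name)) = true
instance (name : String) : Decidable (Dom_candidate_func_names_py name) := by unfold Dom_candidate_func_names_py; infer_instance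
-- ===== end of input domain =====

-- B changes only the decomposition (running-suffix scan by '::' positions instead of split + re-join); same results, similar cost.

-- ===== PORT A =====
-- shared module helper _normalise_func_name (both Pythons call it)
def normalise_func_name_py (name : String) : String :=
  let paren := PySem.Str.find name "("
  let name := if paren ≠ -1 then PySem.Str.slice name none (some paren) else name
  PySem.Str.strip name

def candidate_func_names_py (name : String) : List String :=
  let bare := normalise_func_name_py name
  if bare = "" then []
  else
    let parts := (PySem.Str.split? bare "::").getD []
    (PySem.List.pyRange 0 (parts.length : Int) 1).foldl
      (fun candidates index =>
        let candidate := PySem.Str.strip (PySem.Str.join "::" (PySem.List.slice parts (some index) none))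
        if candidate ≠ "" ∧ candidate ∉ candidates then candidates ++ [candidate] else candidates)
      []

-- ===== PORT B =====
-- the 'while True' loop of B: emit s.strip(), then jump past the next '::' (exit on -1)
def candidate_loop (s : String) (out : List String) : List String :=
  let cand := PySem.Str.strip s
  let out := if cand ≠ "" ∧ cand ∉ out then out ++ [cand] else out
  let idx := PySem.Str.find s "::"
  if h : idx = -1 then out
  else candidate_loop (PySem.Str.slice s (some (idx + 2)) none) out
termination_by s.toList.length
decreasing_by
  rw [PySem.Str.toList_slice, PySem.Chars.slice_eq_listSlice]
  have h0 : (0:Int) ≤ idx := by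
    have h1 : -1 ≤ idx := PySem.Chars.neg_one_le_find s.toList "::".toList
    omega
  rw [PySem.List.slice_from _ (by omega : (0:Int) ≤ idx + 2)]
  have hinf : "::".toList <:+: s.toList := by
    have := (PySem.Str.find_ne_neg_one_iff (s := s) (sub := "::")).mp h
    exact this
  have hlen : 2 ≤ s.toList.length := by
    have := hinf.length_le; simpa using this
  simp only [List.length_drop]
  omega

def candidate_func_names_py_alt (name : String) : List String :=
  let bare := normalise_func_name_py name
  if bare = "" then []
  else candidate_loop bare []

-- ===== PRECONDITION & SPEC =====
def Spec_candidate_func_names_py (name : String) (out : List String) : Prop := out = candidate_func_names_py_alt name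
instance (name : String) (out : List String) : Decidable (Spec_candidate_func_names_py name out) := by unfold Spec_candidate_func_names_py; infer_instance

-- ===== CLAIM (what is proved, stated in full; the proofs are below) =====
def Claim_equal_candidate_func_names_py : Prop := ∀ (name : String), Dom_candidate_func_names_py name → Spec_candidate_func_names_py name (candidate_func_names_py name)

-- ===== LEMMAS AND PROOFS =====

def sp (l : List Char) : List (List Char) :=
  match l with
  | [] => [[]]
  | c :: rest =>
    if [':', ':'].isPrefixOf (c :: rest) then [] :: sp rest.tail
    else
      match sp rest with
      | [] => [[c]]
      | h :: t => (c :: h) :: t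
termination_by l.length
decreasing_by
  · simp [List.length_tail]
  · simp

theorem sp_ne_nil (l : List Char) : sp l ≠ [] := by
  unfold sp
  cases l with
  | nil => simp
  | cons c rest =>
    by_cases hp : [':',':'].isPrefixOf (c :: rest) = true
    · simp [hp]
    · simp only [hp, Bool.false_eq_true, if_false]
      cases hsp : sp rest <;> simp

theorem cons_headI_tail {α : Type} [Inhabited α] (l : List α) (h : l ≠ []) : l.headI :: l.tail = l := by
  cases l with
  | nil => exact absurd rfl h
  | cons a t => rfl

theorem splitOn_go_spec : ∀ (fuel : Nat) (l cur : List Char) (acc : List (List Char)),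
    l.length < fuel →
    PySem.Chars.splitOn.go [':',':'] fuel l cur acc
      = acc.reverse ++ (cur.reverse ++ (sp l).headI) :: (sp l).tail := by
  intro fuel
  induction fuel with
  | zero => intro l cur acc h; omega
  | succ fuel ih =>
    intro l cur acc h
    cases l with
    | nil =>
      simp [PySem.Chars.splitOn.go, sp]
    | cons c rest =>
      rw [PySem.Chars.splitOn.go]
      by_cases hp : [':',':'].isPrefixOf (c :: rest) = true
      · simp only [hp, if_true]
        have hlen : (List.drop [':',':'].length (c :: rest)).length < fuel := by
          simp at h ⊢; omega
        rw [ih _ _ _ hlen]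
        have hsp : sp (c :: rest) = [] :: sp rest.tail := by
          conv_lhs => rw [sp]; rw [if_pos hp]
        have hdrop : List.drop [':',':'].length (c :: rest) = rest.tail := by
          cases rest <;> simp
        rw [hdrop, hsp]
        simp
        rw [cons_headI_tail _ (sp_ne_nil rest.tail)]
      · simp only [hp, Bool.false_eq_true, if_false]
        have hlen : rest.length < fuel := by simp at h; omega
        rw [ih _ _ _ hlen]
        have hsp : sp (c :: rest) = (c :: (sp rest).headI) :: (sp rest).tail := by
          conv_lhs => rw [sp]; rw [if_neg hp]
          cases hr : sp rest with
          | nil => exact absurd hr (sp_ne_nil rest)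
          | cons a t => simp
        rw [hsp]
        simp

theorem splitOn_eq_sp (l : List Char) : PySem.Chars.splitOn l [':',':'] = sp l := by
  unfold PySem.Chars.splitOn
  rw [splitOn_go_spec (l.length + 1) l [] [] (by omega)]
  simp
  exact cons_headI_tail _ (sp_ne_nil l)

theorem findgo_shift (sub : List Char) : ∀ (l : List Char) (k : Nat),
    PySem.Chars.find.go sub l k
      = if PySem.Chars.find.go sub l 0 = -1 then -1 else PySem.Chars.find.go sub l 0 + k := by
  intro l
  induction l with
  | nil =>
    intro k
    simp [PySem.Chars.find.go]
    split_ifs <;> simp_all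
  | cons c t ih =>
    intro k
    rw [PySem.Chars.find.go]
    conv_rhs => rw [PySem.Chars.find.go]
    by_cases hp : sub.isPrefixOf (c :: t) = true
    · simp [hp]
    · simp only [hp, Bool.false_eq_true, if_false]
      rw [ih (k+1), ih 1]
      have hb : -1 ≤ PySem.Chars.find.go sub t 0 := PySem.Chars.neg_one_le_find t sub
      split_ifs <;> push_cast <;> omega

theorem find_cons (sub : List Char) (c : Char) (rest : List Char) :
    PySem.Chars.find (c :: rest) sub
      = if sub.isPrefixOf (c :: rest) then 0
        else if PySem.Chars.find rest sub = -1 then -1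
        else PySem.Chars.find rest sub + 1 := by
  unfold PySem.Chars.find
  rw [PySem.Chars.find.go]
  by_cases hp : sub.isPrefixOf (c :: rest) = true
  · simp [hp]
  · simp only [hp, Bool.false_eq_true, if_false]
    rw [findgo_shift]
    norm_num

theorem find_nil_sep : PySem.Chars.find ([] : List Char) [':',':'] = -1 := by decide

theorem sp_of_find_neg (l : List Char) (h : PySem.Chars.find l [':',':'] = -1) : sp l = [l] := by
  induction l with
  | nil => rw [sp]
  | cons c rest ih =>
    rw [find_cons] at h
    by_cases hp : [':',':'].isPrefixOf (c :: rest) = true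
    · rw [if_pos hp] at h; exact absurd h (by norm_num)
    · rw [if_neg hp] at h
      have hb : -1 ≤ PySem.Chars.find rest [':',':'] := PySem.Chars.neg_one_le_find rest [':',':']
      have h2 : PySem.Chars.find rest [':',':'] = -1 := by
        by_cases h1 : PySem.Chars.find rest [':',':'] = -1
        · exact h1
        · rw [if_neg h1] at h; omega
      conv_lhs => rw [sp]
      rw [if_neg hp, ih h2]

theorem sp_of_find_nonneg (l : List Char) (h : 0 ≤ PySem.Chars.find l [':',':']) :
    sp l = l.take (PySem.Chars.find l [':',':']).toNat
            :: sp (l.drop ((PySem.Chars.find l [':',':']).toNat + 2)) := by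
  induction l with
  | nil => rw [find_nil_sep] at h; omega
  | cons c rest ih =>
    by_cases hp : [':',':'].isPrefixOf (c :: rest) = true
    · have hf : PySem.Chars.find (c :: rest) [':',':'] = 0 := by
        rw [find_cons, if_pos hp]
      rw [hf]
      conv_lhs => rw [sp]
      rw [if_pos hp]
      have : (c :: rest).drop ((0:Int).toNat + 2) = rest.tail := by cases rest <;> simp
      rw [this]
      simp
    · have hb : -1 ≤ PySem.Chars.find rest [':',':'] := PySem.Chars.neg_one_le_find rest [':',':']
      have hfc := find_cons [':',':'] c rest
      rw [if_neg hp] at hfc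
      have hr : 0 ≤ PySem.Chars.find rest [':',':'] := by
        by_cases h2 : PySem.Chars.find rest [':',':'] = -1
        · rw [if_pos h2] at hfc; rw [hfc] at h; omega
        · omega
      rw [if_neg (by omega : ¬ PySem.Chars.find rest [':',':'] = -1)] at hfc
      rw [hfc]
      have htn : (PySem.Chars.find rest [':',':'] + 1).toNat
          = (PySem.Chars.find rest [':',':']).toNat + 1 := by omega
      rw [htn]
      conv_lhs => rw [sp]
      rw [if_neg hp, ih hr]
      simp

theorem intercalate_cons_ne_nil {α : Type} (sep x : List α) (ys : List (List α)) (h : ys ≠ []) :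
    List.intercalate sep (x :: ys) = x ++ sep ++ List.intercalate sep ys := by
  cases ys with
  | nil => exact absurd rfl h
  | cons y t => simp [List.intercalate, List.append_assoc]

theorem join_sp (l : List Char) : PySem.Chars.join [':',':'] (sp l) = l := by
  by_cases hf : PySem.Chars.find l [':',':'] = -1
  · rw [sp_of_find_neg l hf]; simp [PySem.Chars.join, List.intercalate]
  · have hb := PySem.Chars.neg_one_le_find l [':',':']
    have h0 : 0 ≤ PySem.Chars.find l [':',':'] := by omega
    have hspec := PySem.Chars.find_spec (s := l) (sub := [':',':']) h0
    obtain ⟨hpre, -⟩ := hspec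
    obtain ⟨t, ht⟩ := hpre
    have hlen2 : (PySem.Chars.find l [':',':']).toNat + 2 ≤ l.length := by
      have := congrArg List.length ht
      simp at this
      omega
    rw [sp_of_find_nonneg l h0]
    have hne := sp_ne_nil (l.drop ((PySem.Chars.find l [':',':']).toNat + 2))
    unfold PySem.Chars.join
    rw [intercalate_cons_ne_nil _ _ _ hne]
    have hrec := join_sp (l.drop ((PySem.Chars.find l [':',':']).toNat + 2))
    unfold PySem.Chars.join at hrec
    rw [hrec]
    have hdd : l.drop ((PySem.Chars.find l [':',':']).toNat + 2) = t := by
      have h1 : (l.drop (PySem.Chars.find l [':',':']).toNat).drop 2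
          = l.drop ((PySem.Chars.find l [':',':']).toNat + 2) := by
        rw [List.drop_drop]
      rw [← h1, ← ht]; simp
    rw [hdd]
    conv_rhs => rw [← List.take_append_drop (PySem.Chars.find l [':',':']).toNat l, ← ht]
    simp
termination_by l.length
decreasing_by
  simp only [List.length_drop]
  omega

def bChain (s : List Char) : List (List Char) :=
  if h : PySem.Chars.find s [':',':'] = -1 then [s]
  else s :: bChain (s.drop ((PySem.Chars.find s [':',':']).toNat + 2))
termination_by s.length
decreasing_by
  have hinf : [':',':'] <:+: s := (PySem.Chars.find_ne_neg_one_iff s [':',':']).mp h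
  have hlen : 2 ≤ s.length := by have := hinf.length_le; simpa using this
  simp only [List.length_drop]; omega

theorem chain_eq (s : List Char) :
    (List.range (sp s).length).map (fun i => PySem.Chars.join [':',':'] ((sp s).drop i)) = bChain s := by
  rw [bChain]
  by_cases hf : PySem.Chars.find s [':',':'] = -1
  · rw [dif_pos hf, sp_of_find_neg s hf]
    simp [PySem.Chars.join, List.intercalate]
  · rw [dif_neg hf]
    have hb := PySem.Chars.neg_one_le_find s [':',':']
    have h0 : 0 ≤ PySem.Chars.find s [':',':'] := by omega
    have hsp := sp_of_find_nonneg s h0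
    rw [hsp]
    simp only [List.length_cons, List.range_succ_eq_map, List.map_cons, List.map_map]
    refine congrArg₂ _ ?_ ?_
    · rw [← hsp]
      exact join_sp s
    · rw [← chain_eq (s.drop ((PySem.Chars.find s [':',':']).toNat + 2))]
      simp [Function.comp]
termination_by s.length
decreasing_by
  have hinf : [':',':'] <:+: s := (PySem.Chars.find_ne_neg_one_iff s [':',':']).mp hf
  have hlen : 2 ≤ s.length := by have := hinf.length_le; simpa using this
  simp only [List.length_drop]; omega

def stepS (acc : List String) (c : String) : List String :=
  let cand := PySem.Str.strip c
  if cand ≠ "" ∧ cand ∉ acc then acc ++ [cand] else acc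

theorem candidate_loop_eq (s : String) (out : List String) :
    candidate_loop s out = ((bChain s.toList).map String.ofList).foldl stepS out := by
  rw [candidate_loop, bChain]
  have hsep : ("::".toList : List Char) = [':',':'] := rfl
  by_cases hf : PySem.Chars.find s.toList [':',':'] = -1
  · rw [dif_pos hf]
    have hf' : PySem.Str.find s "::" = -1 := by
      show PySem.Chars.find s.toList "::".toList = -1
      rw [hsep]; exact hf
    rw [dif_pos hf']
    simp [stepS, String.ofList_toList]
  · rw [dif_neg hf]
    have hf' : ¬ PySem.Str.find s "::" = -1 := by
      show ¬ PySem.Chars.find s.toList "::".toList = -1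
      rw [hsep]; exact hf
    rw [dif_neg hf']
    have hb : -1 ≤ PySem.Chars.find s.toList [':',':'] := PySem.Chars.neg_one_le_find _ _
    have h0 : 0 ≤ PySem.Chars.find s.toList [':',':'] := by omega
    have hslice : (PySem.Str.slice s (some (PySem.Str.find s "::" + 2)) none).toList
        = s.toList.drop ((PySem.Chars.find s.toList [':',':']).toNat + 2) := by
      rw [PySem.Str.toList_slice, PySem.Chars.slice_eq_listSlice]
      have : PySem.Str.find s "::" = PySem.Chars.find s.toList [':',':'] := by
        show PySem.Chars.find s.toList "::".toList = _; rw [hsep]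
      rw [this, PySem.List.slice_from _ (by omega : (0:Int) ≤ PySem.Chars.find s.toList [':',':'] + 2)]
      congr 1
      omega
    rw [candidate_loop_eq (PySem.Str.slice s (some (PySem.Str.find s "::" + 2)) none) _]
    rw [hslice]
    simp [stepS, String.ofList_toList]
termination_by s.toList.length
decreasing_by
  rw [hslice]
  have hinf : [':',':'] <:+: s.toList := (PySem.Chars.find_ne_neg_one_iff _ _).mp hf
  have hlen : 2 ≤ s.toList.length := by have := hinf.length_le; simpa using this
  simp only [List.length_drop]; omega

theorem ports_agree (name : String) :
    candidate_func_names_py name = candidate_func_names_py_alt name := by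
  unfold candidate_func_names_py candidate_func_names_py_alt
  by_cases hb : normalise_func_name_py name = ""
  · simp [hb]
  · rw [if_neg hb, if_neg hb]
    set bare := normalise_func_name_py name with hbare
    have hparts : (PySem.Str.split? bare "::").getD []
        = (sp bare.toList).map String.ofList := by
      show (Option.map (List.map String.ofList) (PySem.Chars.split? bare.toList "::".toList)).getD [] = _
      have : PySem.Chars.split? bare.toList "::".toList
          = some (PySem.Chars.splitOn bare.toList [':',':']) := by
        show (if ("::".toList : List Char).isEmpty = true then none
              else some (PySem.Chars.splitOn bare.toList "::".toList)) = _
        rfl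
      rw [this, splitOn_eq_sp]
      rfl
    rw [hparts]
    dsimp only
    set P := (sp bare.toList).map String.ofList with hP
    -- A's index fold → fold of stepS over the mapped chain
    rw [PySem.List.pyRange_one]
    have hnn : ((P.length : Int) - 0).toNat = P.length := by omega
    rw [hnn]
    have hmap0 : (List.range P.length).map (fun k : Nat => (0:Int) + (k:Int))
        = (List.range P.length).map (fun k : Nat => (k:Int)) := by simp
    rw [hmap0, List.foldl_map]
    refine Eq.trans (PySem.List.foldl_congr_mem (List.range P.length) _
      (fun x (y : Nat) => stepS x (PySem.Str.join "::" (PySem.List.slice P (some (y:Int)) none)))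
      [] ?_) ?_
    · intro acc y _
      simp [stepS]
    rw [← List.foldl_map
      (f := fun i : Nat => PySem.Str.join "::" (PySem.List.slice P (some (i:Int)) none))
      (g := stepS)]
    rw [candidate_loop_eq bare []]
    refine congrArg (fun l => List.foldl stepS [] l) ?_
    -- the two candidate lists coincide
    have hlen : P.length = (sp bare.toList).length := by simp [hP]
    rw [hlen]
    rw [← chain_eq bare.toList, List.map_map]
    apply List.map_congr_left
    intro i hi
    rw [List.mem_range] at hi
    rw [PySem.List.slice_from _ (by omega : (0:Int) ≤ (i:Int)), Int.toNat_natCast]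
    show PySem.Str.join "::" (P.drop i) = _
    rw [hP, ← List.map_drop]
    show String.ofList (PySem.Chars.join "::".toList
      ((((sp bare.toList).drop i).map String.ofList).map String.toList)) = _
    rw [List.map_map]
    simp [Function.comp_def]

-- ===== VERDICT (by name: the statement is the Claim_ definition above) =====
theorem candidate_func_names_py_spec : Claim_equal_candidate_func_names_py := by
  intro name _
  unfold Spec_candidate_func_names_py
  exact ports_agree name
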